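-- pv_equiv track=rewrite | github.com/Shubham92166/Data-Structures-and-Algorithm | Array/beggarsOutsideTemple.py | solve
-- ===== SOURCE A (Python) =====
-- def solve(A, B):
--     pre = [0]*(A+2)
--     for q in B:
--         pre[q[0]] += q[2]
--         pre[q[1]+1] -= q[2]
--     for i in range(1, len(pre)):
--         pre[i] = pre[i]+pre[i-1]
--     return pre[1:-1]
-- ===== SOURCE B (Python) =====
-- def solve(A, B):
--     res = [0] * (A + 2)
--     for q in B:
--         res[q[0]:] = [x + q[2] for x in res[q[0]:]]
--         res[q[1] + 1:] = [x - q[2] for x in res[q[1] + 1:]]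
--     return res[1:-1]
-- ===== Notes on version B (the rewrite author's own statement) =====
-- stated objective: alternative
-- what changed: A builds a length-(A+2) difference array (two point updates per query) and then recovers values with an in-place prefix-sum pass; B keeps a 1-indexed buffer with a guard cell at each end and applies every query directly as two suffix slice-assignment updates (add q[2] from the start index on, subtract it from end+1 on), so there is no difference array and no prefix-sum pass.
import Mathlib
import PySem

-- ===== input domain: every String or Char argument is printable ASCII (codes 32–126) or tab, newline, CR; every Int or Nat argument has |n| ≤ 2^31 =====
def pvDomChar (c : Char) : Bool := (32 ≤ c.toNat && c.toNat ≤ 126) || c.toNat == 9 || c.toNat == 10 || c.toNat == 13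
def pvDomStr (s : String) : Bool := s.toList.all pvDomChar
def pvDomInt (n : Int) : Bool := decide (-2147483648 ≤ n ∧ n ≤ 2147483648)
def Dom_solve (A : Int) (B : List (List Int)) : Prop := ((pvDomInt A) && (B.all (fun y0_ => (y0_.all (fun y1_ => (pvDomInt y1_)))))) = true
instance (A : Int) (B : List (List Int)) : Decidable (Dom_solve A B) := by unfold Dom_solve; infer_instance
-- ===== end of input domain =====

-- B replaces A's difference-array + prefix-sum pass by direct suffix slice-assignment updates per query (no prefix pass); objective: alternative.


-- ===== PORT A =====
def solve (A : Int) (B : List (List Int)) : List Int :=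
  let pre0 : List Int := List.replicate (A + 2).toNat 0
  let pre1 := B.foldl (fun pre q =>
    let pre' := PySem.List.pySetD pre (PySem.List.pyGetD q 0 0)
      (PySem.List.pyGetD pre (PySem.List.pyGetD q 0 0) 0 + PySem.List.pyGetD q 2 0)
    PySem.List.pySetD pre' (PySem.List.pyGetD q 1 0 + 1)
      (PySem.List.pyGetD pre' (PySem.List.pyGetD q 1 0 + 1) 0 - PySem.List.pyGetD q 2 0)) pre0
  let pre2 := (PySem.List.pyRange 1 (pre1.length : Int) 1).foldl (fun pre i =>
    PySem.List.pySetD pre i (PySem.List.pyGetD pre i 0 + PySem.List.pyGetD pre (i - 1) 0)) pre1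
  PySem.List.slice pre2 (some 1) (some (-1))

-- ===== PORT B =====
-- res[a:] = [x + v for x in res[a:]] — hand port of Python's step-1 suffix slice assignment
-- (start index: nonnegative clamps at len, negative counts from the end and clamps at 0); exact.
def pvAddFrom (res : List Int) (a v : Int) : List Int :=
  let s := if 0 ≤ a then min a.toNat res.length else (a + res.length).toNat
  res.take s ++ (res.drop s).map (fun x => x + v)

-- res[a:] = [x - v for x in res[a:]] — same slice assignment, subtracting; exact.
def pvSubFrom (res : List Int) (a v : Int) : List Int :=
  let s := if 0 ≤ a then min a.toNat res.length else (a + res.length).toNat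
  res.take s ++ (res.drop s).map (fun x => x - v)

def solve_alt (A : Int) (B : List (List Int)) : List Int :=
  let res := B.foldl (fun res q =>
    pvSubFrom (pvAddFrom res (PySem.List.pyGetD q 0 0) (PySem.List.pyGetD q 2 0))
      (PySem.List.pyGetD q 1 0 + 1) (PySem.List.pyGetD q 2 0)) (List.replicate (A + 2).toNat 0)
  PySem.List.slice res (some 1) (some (-1))

-- ===== PRECONDITION & SPEC =====
-- Pre_ is exactly the set of inputs on which A returns (no IndexError): every query has at least the three
-- read fields and both q[0] and q[1]+1 are legal Python indices (negative ones wrap) into the length-(A+2) array.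
def Pre_solve (A : Int) (B : List (List Int)) : Prop :=
  ∀ q ∈ B, 3 ≤ q.length ∧ -(A + 2) ≤ q.getD 0 0 ∧ q.getD 0 0 ≤ A + 1 ∧
    -(A + 2) ≤ q.getD 1 0 + 1 ∧ q.getD 1 0 + 1 ≤ A + 1
instance (A : Int) (B : List (List Int)) : Decidable (Pre_solve A B) := by unfold Pre_solve; infer_instance
def pvWitness_solve : Int × List (List Int) := (3, [[1, 2, 5], [0, 3, -1], [3, -2, 7]])

def Spec_solve (A : Int) (B : List (List Int)) (out : List Int) : Prop := out = solve_alt A B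
instance (A : Int) (B : List (List Int)) (out : List Int) : Decidable (Spec_solve A B out) := by unfold Spec_solve; infer_instance

-- ===== CLAIM (what is proved, stated in full; the proofs are below) =====
def Claim_equal_solve : Prop := ∀ (A : Int) (B : List (List Int)), Dom_solve A B → Pre_solve A B → Spec_solve A B (solve A B)

-- ===== LEMMAS AND PROOFS =====

-- the three fields of a query, as the ports read them
def pvQ0 (q : List Int) : Int := PySem.List.pyGetD q 0 0
def pvQ1 (q : List Int) : Int := PySem.List.pyGetD q 1 0
def pvQV (q : List Int) : Int := PySem.List.pyGetD q 2 0

-- Python's index normalization: a negative index counts from the end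
def pvWrap (L x : Int) : Int := if 0 ≤ x then x else x + L

lemma pvWrap_bounds (L x : Int) (h1 : -L ≤ x) (h2 : x < L) : 0 ≤ pvWrap L x ∧ pvWrap L x < L := by
  rw [pvWrap]; split_ifs <;> omega

lemma getD_replicate_zero (m k : Nat) : (List.replicate m (0 : Int)).getD k 0 = 0 := by
  simp [List.getD_eq_getElem?_getD, List.getElem?_replicate]
  split_ifs <;> rfl

-- getD through List.set
lemma getD_set (l : List Int) (m k : Nat) (v : Int) (hm : m < l.length) :
    (l.set m v).getD k 0 = if k = m then v else l.getD k 0 := by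
  rw [List.getD_eq_getElem?_getD, List.getD_eq_getElem?_getD, List.getElem?_set]
  by_cases h : m = k
  · subst h; rw [if_pos rfl, if_pos hm, if_pos rfl]; rfl
  · rw [if_neg h, if_neg (fun hh => h hh.symm)]

lemma length_pySetD' (l : List Int) (i : Int) (v : Int) :
    (PySem.List.pySetD l i v).length = l.length := PySem.List.length_pySetD l i v

-- pySetD at a nonneg in-range Int index, read back through getD
lemma getD_pySetD (l : List Int) (i : Int) (k : Nat) (v : Int)
    (h0 : 0 ≤ i) (hlt : i < l.length) :
    (PySem.List.pySetD l i v).getD k 0 = if (k : Int) = i then v else l.getD k 0 := by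
  rw [PySem.List.pySetD_of_nonneg l v h0, getD_set _ _ _ _ (by omega)]
  have : (k : Int) = i ↔ k = i.toNat := by omega
  simp [this]

lemma pyGetD_nonneg_eq_getD (l : List Int) (i : Int) (h0 : 0 ≤ i) :
    PySem.List.pyGetD l i 0 = l.getD i.toNat 0 := by
  rcases Int.eq_ofNat_of_zero_le h0 with ⟨m, rfl⟩
  simp [PySem.List.pyGetD_natCast]

-- pySetD / pyGetD at any legal Python index (negative ones wrap)
lemma pySetD_wrap (l : List Int) (i : Int) (v : Int) (h1 : -(l.length : Int) ≤ i) (_h2 : i < l.length) :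
    PySem.List.pySetD l i v = l.set (pvWrap l.length i).toNat v := by
  by_cases h0 : 0 ≤ i
  · rw [pvWrap, if_pos h0]; exact PySem.List.pySetD_of_nonneg l v h0
  · rw [pvWrap, if_neg h0]
    simp only [PySem.List.pySetD, PySem.List.pySet?, PySem.List.pyIdx?, if_neg h0, if_pos h1]
    simp only [Option.map_some, Option.getD_some]
    congr 1
    omega

lemma pyGetD_wrap (l : List Int) (i : Int) (h1 : -(l.length : Int) ≤ i) (h2 : i < l.length) :
    PySem.List.pyGetD l i 0 = l.getD (pvWrap l.length i).toNat 0 := by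
  by_cases h0 : 0 ≤ i
  · rw [pvWrap, if_pos h0]
    exact pyGetD_nonneg_eq_getD l i h0
  · rw [pvWrap, if_neg h0]
    rw [show i = -(((-i).toNat : Nat) : Int) from by omega,
        PySem.List.pyGetD_neg_natCast _ _ _ (by omega) (by omega)]
    rw [List.getD_eq_getElem l 0 (by omega)]
    congr 1
    omega

-- ---------- B side ----------

-- a suffix slice assignment rewritten additively
lemma subFrom_eq_addFrom (res : List Int) (a v : Int) :
    pvSubFrom res a v = pvAddFrom res a (-v) := by
  unfold pvSubFrom pvAddFrom
  simp [sub_eq_add_neg]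

lemma len_addFrom (res : List Int) (a v : Int) : (pvAddFrom res a v).length = res.length := by
  unfold pvAddFrom
  dsimp only
  rw [List.length_append, List.length_take, List.length_map, List.length_drop]
  split_ifs <;> omega

lemma len_subFrom (res : List Int) (a v : Int) : (pvSubFrom res a v).length = res.length := by
  rw [subFrom_eq_addFrom, len_addFrom]

-- the suffix update adds v at exactly the positions from the normalized start index on
lemma getD_addFrom (res : List Int) (a v : Int) (n k : Nat) (hres : res.length = n + 2)
    (hk : k < n + 2) (h1 : -((n : Int) + 2) ≤ a) (h2 : a < (n : Int) + 2) :
    (pvAddFrom res a v).getD k 0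
    = res.getD k 0 + (if pvWrap ((n : Int) + 2) a ≤ (k : Int) then v else 0) := by
  unfold pvAddFrom
  dsimp only
  have hw := pvWrap_bounds ((n : Int) + 2) a h1 h2
  have hs : (if 0 ≤ a then min a.toNat res.length else (a + res.length).toNat)
      = (pvWrap ((n : Int) + 2) a).toNat := by
    rw [pvWrap]; split_ifs <;> omega
  rw [hs]
  set s := (pvWrap ((n : Int) + 2) a).toNat with hsdef
  have hsle : s ≤ res.length := by omega
  have hlen_take : (res.take s).length = s := by rw [List.length_take]; omega
  have hlenall : (res.take s ++ (res.drop s).map (fun x => x + v)).length = n + 2 := by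
    rw [List.length_append, hlen_take, List.length_map, List.length_drop]; omega
  by_cases hks : k < s
  · rw [List.getD_eq_getElem _ 0 (by omega), List.getElem_append_left (by omega),
        List.getElem_take, List.getD_eq_getElem _ 0 (by omega), if_neg (by omega)]
    ring
  · rw [List.getD_eq_getElem _ 0 (by omega),
        List.getElem_append_right (by rw [hlen_take]; omega),
        List.getElem_map, List.getElem_drop, List.getD_eq_getElem _ 0 (by omega),
        if_pos (by omega)]
    congr 2
    rw [hlen_take]
    omega

lemma getD_subFrom (res : List Int) (a v : Int) (n k : Nat) (hres : res.length = n + 2)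
    (hk : k < n + 2) (h1 : -((n : Int) + 2) ≤ a) (h2 : a < (n : Int) + 2) :
    (pvSubFrom res a v).getD k 0
    = res.getD k 0 + (if pvWrap ((n : Int) + 2) a ≤ (k : Int) then -v else 0) := by
  rw [subFrom_eq_addFrom, getD_addFrom res a (-v) n k hres hk h1 h2]

-- outer loop of B: per query, one adding and one subtracting suffix update
lemma b_outer_getD (n k : Nat) (hk : k < n + 2) :
    ∀ (B : List (List Int)) (res : List Int), res.length = n + 2 →
    (∀ q ∈ B, -((n : Int) + 2) ≤ pvQ0 q ∧ pvQ0 q ≤ (n : Int) + 1 ∧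
      -((n : Int) + 2) ≤ pvQ1 q + 1 ∧ pvQ1 q + 1 ≤ (n : Int) + 1) →
    ((B.foldl (fun res q =>
      pvSubFrom (pvAddFrom res (PySem.List.pyGetD q 0 0) (PySem.List.pyGetD q 2 0))
        (PySem.List.pyGetD q 1 0 + 1) (PySem.List.pyGetD q 2 0)) res).getD k 0)
    = res.getD k 0 + (B.map (fun q =>
        (if pvWrap ((n : Int) + 2) (pvQ0 q) ≤ (k : Int) then pvQV q else 0)
        + (if pvWrap ((n : Int) + 2) (pvQ1 q + 1) ≤ (k : Int) then -pvQV q else 0))).sum := by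
  intro B
  induction B with
  | nil => intro res h _; simp
  | cons q B ih =>
    intro res hres hq
    obtain ⟨h1, h2, h3, h4⟩ := hq q (by simp)
    simp only [List.foldl_cons, List.map_cons, List.sum_cons]
    rw [ih _ (by rw [len_subFrom, len_addFrom]; exact hres) (fun p hp => hq p (by simp [hp]))]
    rw [getD_subFrom _ _ _ n k (by rw [len_addFrom]; exact hres) hk
          (by simp only [pvQ1] at h3; omega) (by simp only [pvQ1] at h4; omega)]
    rw [getD_addFrom _ _ _ n k hres hk
          (by simp only [pvQ0] at h1; omega) (by simp only [pvQ0] at h2; omega)]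
    simp only [pvQ0, pvQ1, pvQV]
    ring

lemma b_outer_len : ∀ (B : List (List Int)) (res : List Int),
    ((B.foldl (fun res q =>
      pvSubFrom (pvAddFrom res (PySem.List.pyGetD q 0 0) (PySem.List.pyGetD q 2 0))
        (PySem.List.pyGetD q 1 0 + 1) (PySem.List.pyGetD q 2 0)) res).length)
    = res.length := by
  intro B
  induction B with
  | nil => intro res; rfl
  | cons q B ih => intro res; rw [List.foldl_cons, ih, len_subFrom, len_addFrom]

-- ---------- A side ----------

-- one difference-array update of A (endpoints may be negative: Python wraps them)
lemma diff_step_getD (pre : List Int) (q : List Int) (k : Nat) (n : Nat) (hpre : pre.length = n + 2)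
    (h1 : -((n : Int) + 2) ≤ pvQ0 q) (h2 : pvQ0 q ≤ (n : Int) + 1)
    (h3 : -((n : Int) + 2) ≤ pvQ1 q + 1) (h4 : pvQ1 q + 1 ≤ (n : Int) + 1) :
    ((fun pre (q : List Int) =>
      let pre' := PySem.List.pySetD pre (PySem.List.pyGetD q 0 0)
        (PySem.List.pyGetD pre (PySem.List.pyGetD q 0 0) 0 + PySem.List.pyGetD q 2 0)
      PySem.List.pySetD pre' (PySem.List.pyGetD q 1 0 + 1)
        (PySem.List.pyGetD pre' (PySem.List.pyGetD q 1 0 + 1) 0 - PySem.List.pyGetD q 2 0)) pre q).getD k 0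
    = pre.getD k 0 + ((if (k : Int) = pvWrap ((n : Int) + 2) (pvQ0 q) then pvQV q else 0)
        + (if (k : Int) = pvWrap ((n : Int) + 2) (pvQ1 q + 1) then -pvQV q else 0)) := by
  simp only [pvQ0, pvQ1, pvQV] at h1 h2 h3 h4 ⊢
  set a := PySem.List.pyGetD q 0 0 with haa
  set b := PySem.List.pyGetD q 1 0 with hbb
  set v := PySem.List.pyGetD q 2 0 with hvv
  have hplen : ((pre.length : Nat) : Int) = (n : Int) + 2 := by rw [hpre]; push_cast; ring
  set S := pvWrap ((n : Int) + 2) a with hS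
  set E := pvWrap ((n : Int) + 2) (b + 1) with hE
  have hSb : 0 ≤ S ∧ S < (n : Int) + 2 := pvWrap_bounds _ _ h1 (by omega)
  have hEb : 0 ≤ E ∧ E < (n : Int) + 2 := pvWrap_bounds _ _ h3 (by omega)
  have hget1 : PySem.List.pyGetD pre a 0 = pre.getD S.toNat 0 := by
    rw [pyGetD_wrap pre a (by omega) (by omega), hplen]
  have hset1 : ∀ x, PySem.List.pySetD pre a x = pre.set S.toNat x := by
    intro x; rw [pySetD_wrap pre a x (by omega) (by omega), hplen]
  rw [hget1, hset1]
  set pre' := pre.set S.toNat (pre.getD S.toNat 0 + v) with hpre'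
  have hlen' : pre'.length = n + 2 := by rw [hpre', List.length_set, hpre]
  have hplen' : ((pre'.length : Nat) : Int) = (n : Int) + 2 := by rw [hlen']; push_cast; ring
  have hget2 : PySem.List.pyGetD pre' (b + 1) 0 = pre'.getD E.toNat 0 := by
    rw [pyGetD_wrap pre' (b + 1) (by omega) (by omega), hplen']
  have hset2 : ∀ x, PySem.List.pySetD pre' (b + 1) x = pre'.set E.toNat x := by
    intro x; rw [pySetD_wrap pre' (b + 1) x (by omega) (by omega), hplen']
  rw [hget2, hset2]
  have e1 : ∀ m : Nat, pre'.getD m 0 = if m = S.toNat then pre.getD S.toNat 0 + v else pre.getD m 0 := by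
    intro m; rw [hpre']; exact getD_set pre S.toNat m _ (by omega)
  rw [getD_set pre' E.toNat k _ (by omega), e1, e1]
  by_cases hk1 : (k : Int) = E
  · rw [if_pos (show k = E.toNat from by omega), if_pos hk1]
    by_cases hk2 : (k : Int) = S
    · rw [if_pos (show E.toNat = S.toNat from by omega), if_pos hk2,
          show S.toNat = k from by omega]
      ring
    · rw [if_neg (show ¬ E.toNat = S.toNat from by omega), show E.toNat = k from by omega,
          if_neg hk2]
      ring
  · rw [if_neg (show ¬ k = E.toNat from by omega), if_neg hk1]
    by_cases hk2 : (k : Int) = S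
    · rw [if_pos (show k = S.toNat from by omega), if_pos hk2, show S.toNat = k from by omega]
      ring
    · rw [if_neg (show ¬ k = S.toNat from by omega), if_neg hk2]
      ring

lemma diff_step_len (pre q : List Int) :
    ((fun pre (q : List Int) =>
      let pre' := PySem.List.pySetD pre (PySem.List.pyGetD q 0 0)
        (PySem.List.pyGetD pre (PySem.List.pyGetD q 0 0) 0 + PySem.List.pyGetD q 2 0)
      PySem.List.pySetD pre' (PySem.List.pyGetD q 1 0 + 1)
        (PySem.List.pyGetD pre' (PySem.List.pyGetD q 1 0 + 1) 0 - PySem.List.pyGetD q 2 0)) pre q).length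
    = pre.length := by
  dsimp only
  rw [length_pySetD', length_pySetD']

lemma diff_fold_getD (n k : Nat) :
    ∀ (B : List (List Int)) (pre : List Int), pre.length = n + 2 →
    (∀ q ∈ B, -((n : Int) + 2) ≤ pvQ0 q ∧ pvQ0 q ≤ (n : Int) + 1 ∧
      -((n : Int) + 2) ≤ pvQ1 q + 1 ∧ pvQ1 q + 1 ≤ (n : Int) + 1) →
    ((B.foldl (fun pre q =>
      let pre' := PySem.List.pySetD pre (PySem.List.pyGetD q 0 0)
        (PySem.List.pyGetD pre (PySem.List.pyGetD q 0 0) 0 + PySem.List.pyGetD q 2 0)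
      PySem.List.pySetD pre' (PySem.List.pyGetD q 1 0 + 1)
        (PySem.List.pyGetD pre' (PySem.List.pyGetD q 1 0 + 1) 0 - PySem.List.pyGetD q 2 0)) pre).getD k 0)
    = pre.getD k 0 + (B.map (fun q => (if (k : Int) = pvWrap ((n : Int) + 2) (pvQ0 q) then pvQV q else 0)
        + (if (k : Int) = pvWrap ((n : Int) + 2) (pvQ1 q + 1) then -pvQV q else 0))).sum := by
  intro B
  induction B with
  | nil => intro pre h _; simp
  | cons q B ih =>
    intro pre hpre hq
    obtain ⟨h1, h2, h3, h4⟩ := hq q (by simp)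
    simp only [List.foldl_cons, List.map_cons, List.sum_cons]
    rw [ih _ (by rw [diff_step_len]; exact hpre) (fun p hp => hq p (by simp [hp]))]
    rw [diff_step_getD pre q k n hpre h1 h2 h3 h4]
    ring

lemma diff_fold_len : ∀ (B : List (List Int)) (pre : List Int),
    ((B.foldl (fun pre q =>
      let pre' := PySem.List.pySetD pre (PySem.List.pyGetD q 0 0)
        (PySem.List.pyGetD pre (PySem.List.pyGetD q 0 0) 0 + PySem.List.pyGetD q 2 0)
      PySem.List.pySetD pre' (PySem.List.pyGetD q 1 0 + 1)
        (PySem.List.pyGetD pre' (PySem.List.pyGetD q 1 0 + 1) 0 - PySem.List.pyGetD q 2 0)) pre).length)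
    = pre.length := by
  intro B
  induction B with
  | nil => intro pre; rfl
  | cons q B ih => intro pre; rw [List.foldl_cons, ih, diff_step_len]

-- partial sums of a list
def pvPsum (xs : List Int) (k : Nat) : Int := ((List.range (k + 1)).map (fun j => xs.getD j 0)).sum

lemma pvPsum_succ (xs : List Int) (t : Nat) (ht : 1 ≤ t) :
    pvPsum xs t = pvPsum xs (t - 1) + xs.getD t 0 := by
  have h1 : t - 1 + 1 = t := by omega
  calc pvPsum xs t = ((List.range (t + 1)).map (fun j => xs.getD j 0)).sum := rfl
    _ = ((List.range t).map (fun j => xs.getD j 0)).sum + xs.getD t 0 := by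
        rw [List.range_succ]; simp
    _ = pvPsum xs (t - 1) + xs.getD t 0 := by simp only [pvPsum, h1]

lemma prefix_fold_len (t : Int) (pre : List Int) :
    ((PySem.List.pyRange 1 t 1).foldl (fun pre i =>
      PySem.List.pySetD pre i (PySem.List.pyGetD pre i 0 + PySem.List.pyGetD pre (i - 1) 0)) pre).length
    = pre.length := by
  induction (PySem.List.pyRange 1 t 1) generalizing pre with
  | nil => rfl
  | cons x xs ih => rw [List.foldl_cons, ih, length_pySetD']

-- A's in-place prefix-sum loop computes partial sums of the original list
lemma prefix_fold_getD : ∀ (t : Nat) (pre : List Int), t ≤ pre.length → ∀ (k : Nat),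
    ((PySem.List.pyRange 1 (t : Int) 1).foldl (fun pre i =>
      PySem.List.pySetD pre i (PySem.List.pyGetD pre i 0 + PySem.List.pyGetD pre (i - 1) 0)) pre).getD k 0
    = if k < t then pvPsum pre k else pre.getD k 0 := by
  intro t
  induction t with
  | zero =>
    intro pre h k
    rw [PySem.List.pyRange_one_eq_nil (by omega)]
    simp
  | succ t ih =>
    intro pre h k
    by_cases ht : t = 0
    · subst ht
      rw [PySem.List.pyRange_one_eq_nil (by omega)]
      simp only [List.foldl_nil]
      by_cases hk : k < 1
      · rw [if_pos (by omega), show k = 0 from by omega]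
        simp [pvPsum]
      · rw [if_neg (by omega)]
    · rw [show (((t + 1 : Nat)) : Int) = (t : Int) + 1 from by push_cast; ring]
      rw [PySem.List.pyRange_one_succ_right (by omega), List.foldl_append]
      simp only [List.foldl_cons, List.foldl_nil]
      set L := (PySem.List.pyRange 1 (t : Int) 1).foldl (fun pre i =>
        PySem.List.pySetD pre i (PySem.List.pyGetD pre i 0 + PySem.List.pyGetD pre (i - 1) 0)) pre with hL
      have hlenL : L.length = pre.length := prefix_fold_len _ _
      have hstep := getD_pySetD L (t : Int) k
        (PySem.List.pyGetD L (t : Int) 0 + PySem.List.pyGetD L ((t : Int) - 1) 0) (by omega) (by omega)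
      rw [hstep, pyGetD_nonneg_eq_getD L (t : Int) (by omega),
          pyGetD_nonneg_eq_getD L ((t : Int) - 1) (by omega),
          show ((t : Int)).toNat = t from by omega, show ((t : Int) - 1).toNat = t - 1 from by omega]
      have e_t : L.getD t 0 = pre.getD t 0 := by
        rw [hL, ih pre (by omega) t, if_neg (by omega)]
      have e_t1 : L.getD (t - 1) 0 = pvPsum pre (t - 1) := by
        rw [hL, ih pre (by omega) (t - 1), if_pos (by omega)]
      have e_k : L.getD k 0 = if k < t then pvPsum pre k else pre.getD k 0 := by
        rw [hL, ih pre (by omega) k]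
      by_cases hc : (k : Int) = (t : Int)
      · rw [if_pos hc, e_t, e_t1, if_pos (by omega), show k = t from by omega,
            pvPsum_succ pre t (by omega)]
        ring
      · rw [if_neg hc, e_k]
        split_ifs with hk1 hk2 hk2
        · rfl
        · omega
        · omega
        · rfl

-- sum of a point indicator over an initial segment
lemma sum_indicator (v c : Int) (hc : 0 ≤ c) : ∀ (m : Nat),
    ((List.range m).map (fun (j : Nat) => if (j : Int) = c then v else 0)).sum
    = if c < (m : Int) then v else 0 := by
  intro m
  induction m with
  | zero => rw [if_neg (by omega)]; simp
  | succ m ih =>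
    rw [List.range_succ, List.map_append, List.sum_append, ih]
    simp only [List.map_cons, List.map_nil, List.sum_cons, List.sum_nil]
    by_cases h1 : (m : Int) = c
    · rw [if_pos h1, if_neg (by omega), if_pos (by omega)]; ring
    · rw [if_neg h1]
      split_ifs with h2 h3 h3
      · ring
      · omega
      · omega
      · ring

-- swap a double list sum
lemma sum_swap (l1 : List Nat) (l2 : List (List Int)) (f : Nat → List Int → Int) :
    (l1.map (fun a => (l2.map (f a)).sum)).sum = (l2.map (fun b => (l1.map (fun a => f a b)).sum)).sum := by
  induction l1 with
  | nil => simp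
  | cons a l1 ih =>
    simp only [List.map_cons, List.sum_cons, ih]
    rw [← PySem.List.sum_map_add_int]

-- xs[1:-1] of a short list is empty
lemma slice_small (xs : List Int) (h : xs.length ≤ 1) :
    PySem.List.slice xs (some 1) (some (-1)) = [] := by
  simp [PySem.List.slice]
  omega

-- xs[1:-1] as drop/take
lemma slice_one_negone (xs : List Int) (h : 2 ≤ xs.length) :
    PySem.List.slice xs (some 1) (some (-1)) = (xs.drop 1).take (xs.length - 2) := by
  simp [PySem.List.slice]
  rw [show min 1 xs.length = 1 from by omega, show xs.length - 1 - 1 = xs.length - 2 from by omega,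
      List.drop_one]

-- ===== VERDICT (by name: the statement is the Claim_ definition above) =====
theorem solve_spec : Claim_equal_solve := by
  intro A B _ hq
  have hq0 : ∀ q ∈ B, -(A + 2) ≤ pvQ0 q ∧ pvQ0 q ≤ A + 1 ∧
      -(A + 2) ≤ pvQ1 q + 1 ∧ pvQ1 q + 1 ≤ A + 1 := by
    intro q hmem
    obtain ⟨hl, a1, a2, a3, a4⟩ := hq q hmem
    have e0 : pvQ0 q = q.getD 0 0 := by simp [pvQ0, PySem.List.pyGetD_zero]
    have e1 : pvQ1 q = q.getD 1 0 := by
      rw [pvQ1, show (1 : Int) = ((1 : Nat) : Int) from rfl, PySem.List.pyGetD_natCast]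
    refine ⟨by omega, by omega, by omega, by omega⟩
  by_cases hA : 0 ≤ A
  case neg =>
    -- A < 0: both programs produce the empty list
    unfold Spec_solve solve solve_alt
    dsimp only
    rw [PySem.List.pyRange_one_eq_nil (by rw [diff_fold_len, List.length_replicate]; omega)]
    simp only [List.foldl_nil]
    rw [slice_small _ (by rw [diff_fold_len, List.length_replicate]; omega),
        slice_small _ (by rw [b_outer_len, List.length_replicate]; omega)]
  unfold Spec_solve solve solve_alt
  dsimp only
  set n := A.toNat with hn
  have hAn : A = (n : Int) := by omega
  have hq' : ∀ q ∈ B, -((n : Int) + 2) ≤ pvQ0 q ∧ pvQ0 q ≤ (n : Int) + 1 ∧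
      -((n : Int) + 2) ≤ pvQ1 q + 1 ∧ pvQ1 q + 1 ≤ (n : Int) + 1 := by
    intro q hmem
    obtain ⟨b1, b2, b3, b4⟩ := hq0 q hmem
    refine ⟨by omega, by omega, by omega, by omega⟩
  have hlen0 : (List.replicate (A + 2).toNat (0 : Int)).length = n + 2 := by
    rw [List.length_replicate]; omega
  set pre0 := List.replicate (A + 2).toNat (0 : Int) with hpre0
  set pre1 := B.foldl (fun pre q =>
      let pre' := PySem.List.pySetD pre (PySem.List.pyGetD q 0 0)
        (PySem.List.pyGetD pre (PySem.List.pyGetD q 0 0) 0 + PySem.List.pyGetD q 2 0)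
      PySem.List.pySetD pre' (PySem.List.pyGetD q 1 0 + 1)
        (PySem.List.pyGetD pre' (PySem.List.pyGetD q 1 0 + 1) 0 - PySem.List.pyGetD q 2 0)) pre0 with hpre1
  have hlen1 : pre1.length = n + 2 := by rw [hpre1, diff_fold_len, hlen0]
  have hpre1getD : ∀ k : Nat, pre1.getD k 0
      = (B.map (fun q => (if (k : Int) = pvWrap ((n : Int) + 2) (pvQ0 q) then pvQV q else 0)
          + (if (k : Int) = pvWrap ((n : Int) + 2) (pvQ1 q + 1) then -pvQV q else 0))).sum := by
    intro k
    rw [hpre1, diff_fold_getD n k B pre0 hlen0 hq', hpre0, getD_replicate_zero, zero_add]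
  set pre2 := (PySem.List.pyRange 1 (pre1.length : Int) 1).foldl (fun pre i =>
    PySem.List.pySetD pre i (PySem.List.pyGetD pre i 0 + PySem.List.pyGetD pre (i - 1) 0)) pre1 with hpre2
  have hlen2 : pre2.length = n + 2 := by rw [hpre2, prefix_fold_len, hlen1]
  have hpre2getD : ∀ k : Nat, k < n + 2 → pre2.getD k 0 = pvPsum pre1 k := by
    intro k hk
    rw [hpre2, show ((pre1.length : Nat) : Int) = (((n + 2 : Nat)) : Int) from by rw [hlen1],
      prefix_fold_getD (n + 2) pre1 (by omega) k, if_pos hk]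
  -- B side
  set resB := B.foldl (fun res q =>
      pvSubFrom (pvAddFrom res (PySem.List.pyGetD q 0 0) (PySem.List.pyGetD q 2 0))
        (PySem.List.pyGetD q 1 0 + 1) (PySem.List.pyGetD q 2 0)) (List.replicate (A + 2).toNat 0) with hresB
  have hlenB : resB.length = n + 2 := by rw [hresB, b_outer_len, hlen0]
  have hresBgetD : ∀ k : Nat, k < n + 2 → resB.getD k 0
      = (B.map (fun q =>
          (if pvWrap ((n : Int) + 2) (pvQ0 q) ≤ (k : Int) then pvQV q else 0)
          + (if pvWrap ((n : Int) + 2) (pvQ1 q + 1) ≤ (k : Int) then -pvQV q else 0))).sum := by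
    intro k hk
    rw [hresB, b_outer_getD n k hk B pre0 hlen0 hq', hpre0, getD_replicate_zero, zero_add]
  -- assemble
  rw [slice_one_negone pre2 (by omega), slice_one_negone resB (by omega)]
  apply List.ext_getElem
  · rw [List.length_take, List.length_drop, List.length_take, List.length_drop, hlen2, hlenB]
  · intro k hk1 hk2
    have hkn : k < n := by rw [List.length_take, List.length_drop, hlen2] at hk1; omega
    rw [List.getElem_take, List.getElem_drop, List.getElem_take, List.getElem_drop]
    rw [← List.getD_eq_getElem pre2 0 (by omega), ← List.getD_eq_getElem resB 0 (by omega)]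
    rw [hpre2getD (1 + k) (by omega), hresBgetD (1 + k) (by omega)]
    simp only [pvPsum]
    rw [List.map_congr_left (fun j (hj : j ∈ List.range (1 + k + 1)) => hpre1getD j)]
    rw [sum_swap (List.range (1 + k + 1)) B
      (fun j q => (if (j : Int) = pvWrap ((n : Int) + 2) (pvQ0 q) then pvQV q else 0)
        + (if (j : Int) = pvWrap ((n : Int) + 2) (pvQ1 q + 1) then -pvQV q else 0))]
    apply congrArg
    apply List.map_congr_left
    intro q hqmem
    obtain ⟨c1, c2, c3, c4⟩ := hq' q hqmem
    have hw1 := pvWrap_bounds ((n : Int) + 2) (pvQ0 q) c1 (by omega)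
    have hw2 := pvWrap_bounds ((n : Int) + 2) (pvQ1 q + 1) c3 (by omega)
    rw [PySem.List.sum_map_add_int]
    rw [sum_indicator (pvQV q) (pvWrap ((n : Int) + 2) (pvQ0 q)) (by omega) (1 + k + 1),
        sum_indicator (-pvQV q) (pvWrap ((n : Int) + 2) (pvQ1 q + 1)) (by omega) (1 + k + 1)]
    have hcast : ((1 + k + 1 : Nat) : Int) = (k : Int) + 2 := by push_cast; ring
    rw [hcast]
    have hcast2 : ((1 + k : Nat) : Int) = (k : Int) + 1 := by push_cast; ring
    rw [hcast2]
    split_ifs <;> omega
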